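-- pv_equiv track=rewrite | github.com/hamham4/CS419 | busyToFreeTimeConverter.py | getFreeTimesList
-- ===== SOURCE A (Python) =====
-- from collections import namedtuple
--
-- FreeBlock = namedtuple("FreeBlock", "year, month, day, startTime, endTime")
--
-- def getFreeTimesList(busyBlockList):
-- 	#list of free times to be returned
-- 	freeTimes = list()
--
-- 	#Inital end of busy time
-- 	endOfBusyTime = "12:00am"
--
-- 	#Create a list of free time blocks for every busy block
--
-- 	#set the busy variables to the first BusyBlock in hte list
-- 	for busyWindow in busyBlockList:
-- 		busyYear, busyMonth, busyDay, busyStartTime, busyStopTime = busyWindow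
-- 		freeStartTime = endOfBusyTime
-- 		freeStopTime = busyStartTime
-- 		endOfBusyTime = busyStopTime
--
-- 		freeBlock = FreeBlock(busyYear, busyMonth, busyDay, freeStartTime, freeStopTime)
-- 		freeTimes.append(freeBlock)
--
-- 	#End of free time block
-- 	endOfFreeTime = "11:59pm"
--
-- 	#Get the year, month, and day for the time block
-- 	busyYear, busyMonth, busyDay, busyStartTime, busyStopTime = busyBlockList[0]
--
-- 	#The last free time window
-- 	freeBlock = FreeBlock(busyYear, busyMonth, busyDay, endOfBusyTime, endOfFreeTime)
--
-- 	#Add the final free block to the list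
-- 	freeTimes.append(freeBlock)
--
-- 	return freeTimes
-- ===== SOURCE B (Python) =====
-- from collections import namedtuple
--
-- FreeBlock = namedtuple("FreeBlock", "year, month, day, startTime, endTime")
--
-- def getFreeTimesList(busyBlockList):
--     # Flat timeline of boundary times: day start, then every block's start and
--     # stop in order, then day end.  The free blocks are exactly the pairs of
--     # consecutive boundaries at even offsets.
--     bounds = ["12:00am"]
--     for _y, _m, _d, start, stop in busyBlockList:
--         bounds += [start, stop]
--     bounds.append("11:59pm")
--     n = len(busyBlockList)
--     out = []
--     for i in range(n + 1):
--         y, m, d = busyBlockList[0 if i == n else i][:3]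
--         out.append(FreeBlock(y, m, d, bounds[2 * i], bounds[2 * i + 1]))
--     return out
-- ===== Notes on version B (the rewrite author's own statement) =====
-- stated objective: alternative
-- what changed: Instead of A's single pass threading an endOfBusyTime accumulator, B first flattens all blocks into one boundary-time timeline (day start, every start/stop, day end) and then reads each free block off that array by stride-2 indexing in an index loop.
import Mathlib
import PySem

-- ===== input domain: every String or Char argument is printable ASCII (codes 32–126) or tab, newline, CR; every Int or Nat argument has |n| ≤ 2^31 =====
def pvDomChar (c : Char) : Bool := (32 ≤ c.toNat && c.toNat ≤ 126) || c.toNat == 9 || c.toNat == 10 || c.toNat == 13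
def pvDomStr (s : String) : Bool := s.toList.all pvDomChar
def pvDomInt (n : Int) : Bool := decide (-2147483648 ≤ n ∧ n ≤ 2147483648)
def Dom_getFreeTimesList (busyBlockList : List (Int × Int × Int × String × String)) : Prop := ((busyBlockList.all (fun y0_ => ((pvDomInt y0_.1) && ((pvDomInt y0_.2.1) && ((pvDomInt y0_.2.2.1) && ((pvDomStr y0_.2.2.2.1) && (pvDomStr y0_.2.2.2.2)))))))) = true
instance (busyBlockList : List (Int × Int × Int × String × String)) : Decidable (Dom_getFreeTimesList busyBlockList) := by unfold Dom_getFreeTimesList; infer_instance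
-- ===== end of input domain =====

-- B replaces A's accumulator-threading loop by a flat boundary-time timeline read back by
-- stride-2 indexing (objective: alternative decomposition, same O(n) cost).


-- ===== PORT A =====
-- literal port of A: fold threading (freeTimes, endOfBusyTime); then busyBlockList[0]
def getFreeTimesList (busyBlockList : List (Int × Int × Int × String × String)) : List (Int × Int × Int × String × String) :=
  let st := busyBlockList.foldl
    (fun (acc : List (Int × Int × Int × String × String) × String) bw =>
      (acc.1 ++ [(bw.1, bw.2.1, bw.2.2.1, acc.2, bw.2.2.2.1)], bw.2.2.2.2))
    ([], "12:00am")
  match PySem.List.pyGet? busyBlockList 0 with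
  | some h => st.1 ++ [(h.1, h.2.1, h.2.2.1, st.2, "11:59pm")]
  | none => []   -- Python raises IndexError here (empty list); excluded by Pre_

-- ===== PORT B =====
-- literal port of Source B: boundary timeline, then an index loop reading pairs at stride 2.
-- pyGetD is the total form of indexing: the only lookup Python can fail on is
-- busyBlockList[0] for the empty list (IndexError), which Pre_ excludes; the bounds
-- lookups are always in range (bounds has 2n+2 elements and 2i+1 ≤ 2n+1).
def getFreeTimesList_alt (busyBlockList : List (Int × Int × Int × String × String)) : List (Int × Int × Int × String × String) :=
  let bounds := (busyBlockList.foldl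
      (fun (acc : List String) b => acc ++ [b.2.2.2.1, b.2.2.2.2]) ["12:00am"]) ++ ["11:59pm"]
  let n : Int := busyBlockList.length
  (PySem.List.pyRange 0 (n + 1) 1).foldl
    (fun (out : List (Int × Int × Int × String × String)) i =>
      let b := PySem.List.pyGetD busyBlockList (if i == n then 0 else i) (0, 0, 0, "", "")
      out ++ [(b.1, b.2.1, b.2.2.1,
               PySem.List.pyGetD bounds (2 * i) "",
               PySem.List.pyGetD bounds (2 * i + 1) "")]) []

-- ===== PRECONDITION & SPEC =====
-- Pre_ excludes only the empty list, on which A (and B) raise IndexError at busyBlockList[0]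
def Pre_getFreeTimesList (busyBlockList : List (Int × Int × Int × String × String)) : Prop := busyBlockList ≠ []
instance (busyBlockList : List (Int × Int × Int × String × String)) : Decidable (Pre_getFreeTimesList busyBlockList) := by unfold Pre_getFreeTimesList; infer_instance
def pvWitness_getFreeTimesList : (List (Int × Int × Int × String × String)) := [(2024, 1, 2, "9:00am", "10:00am")]
def Spec_getFreeTimesList (busyBlockList : List (Int × Int × Int × String × String)) (out : List (Int × Int × Int × String × String)) : Prop := out = getFreeTimesList_alt busyBlockList
instance (busyBlockList : List (Int × Int × Int × String × String)) (out : List (Int × Int × Int × String × String)) : Decidable (Spec_getFreeTimesList busyBlockList out) := by unfold Spec_getFreeTimesList; infer_instance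

-- ===== CLAIM (what is proved, stated in full; the proofs are below) =====
def Claim_equal_getFreeTimesList : Prop := ∀ (busyBlockList : List (Int × Int × Int × String × String)), Dom_getFreeTimesList busyBlockList → Pre_getFreeTimesList busyBlockList → Spec_getFreeTimesList busyBlockList (getFreeTimesList busyBlockList)

-- ===== LEMMAS AND PROOFS =====

-- recursive characterisation of the blocks A's loop emits and of the final endOfBusyTime
def pvBlocks (l : List (Int × Int × Int × String × String)) (e : String) :
    List (Int × Int × Int × String × String) :=
  match l with
  | [] => []
  | b :: t => (b.1, b.2.1, b.2.2.1, e, b.2.2.2.1) :: pvBlocks t b.2.2.2.2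

def pvLastStop (l : List (Int × Int × Int × String × String)) (e : String) : String :=
  match l with
  | [] => e
  | b :: t => pvLastStop t b.2.2.2.2

lemma pvFoldA (l : List (Int × Int × Int × String × String))
    (acc : List (Int × Int × Int × String × String)) (e : String) :
    l.foldl (fun (acc : List (Int × Int × Int × String × String) × String) bw =>
      (acc.1 ++ [(bw.1, bw.2.1, bw.2.2.1, acc.2, bw.2.2.2.1)], bw.2.2.2.2)) (acc, e)
      = (acc ++ pvBlocks l e, pvLastStop l e) := by
  induction l generalizing acc e with
  | nil => simp [pvBlocks, pvLastStop]
  | cons b t ih => simp [pvBlocks, pvLastStop, ih]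

@[simp] lemma pvBlocks_length (l : List (Int × Int × Int × String × String)) (e : String) :
    (pvBlocks l e).length = l.length := by
  induction l generalizing e with
  | nil => rfl
  | cons b t ih => simp [pvBlocks, ih]

lemma pvBlocks_getElem (l : List (Int × Int × Int × String × String)) (e : String)
    (j : Nat) (hj : j < l.length) :
    (pvBlocks l e)[j]'(by simpa using hj)
      = (l[j].1, l[j].2.1, l[j].2.2.1,
         if j = 0 then e else (l[j-1]'(by omega)).2.2.2.2, l[j].2.2.2.1) := by
  induction l generalizing e j with
  | nil => simp at hj
  | cons b t ih =>
    cases j with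
    | zero => simp [pvBlocks]
    | succ k =>
      have hk : k < t.length := by simpa using hj
      cases k with
      | zero => simpa [pvBlocks] using ih b.2.2.2.2 0 hk
      | succ m => simpa [pvBlocks] using ih b.2.2.2.2 (m+1) hk

-- the flat boundary list B's first loop builds
def pvFlat (l : List (Int × Int × Int × String × String)) : List String :=
  l.flatMap (fun b => [b.2.2.2.1, b.2.2.2.2])

@[simp] lemma pvFlat_length (l : List (Int × Int × Int × String × String)) :
    (pvFlat l).length = 2 * l.length := by
  induction l with
  | nil => rfl
  | cons b t ih => simp [pvFlat] at ih ⊢; omega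

lemma pvFoldB (l : List (Int × Int × Int × String × String)) (acc : List String) :
    l.foldl (fun (acc : List String) b => acc ++ [b.2.2.2.1, b.2.2.2.2]) acc
      = acc ++ pvFlat l := by
  induction l generalizing acc with
  | nil => simp [pvFlat]
  | cons b t ih => simp [pvFlat, ih]

lemma pvFlat_getElem_even (l : List (Int × Int × Int × String × String))
    (j : Nat) (hj : j < l.length) :
    (pvFlat l)[2*j]'(by simp; omega) = l[j].2.2.2.1 := by
  induction l generalizing j with
  | nil => simp at hj
  | cons b t ih =>
    cases j with
    | zero => simp [pvFlat]
    | succ k =>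
      have hk : k < t.length := by simpa using hj
      have h2 : 2 * (k + 1) = (2 * k + 1) + 1 := by omega
      simpa [pvFlat, h2] using ih k hk

lemma pvFlat_getElem_odd (l : List (Int × Int × Int × String × String))
    (j : Nat) (hj : j < l.length) :
    (pvFlat l)[2*j+1]'(by simp; omega) = l[j].2.2.2.2 := by
  induction l generalizing j with
  | nil => simp at hj
  | cons b t ih =>
    cases j with
    | zero => simp [pvFlat]
    | succ k =>
      have hk : k < t.length := by simpa using hj
      have h2 : 2 * (k + 1) + 1 = (2 * k + 1 + 1) + 1 := by omega
      simpa [pvFlat, h2] using ih k hk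

lemma pvLastStop_eq_getLast (l : List (Int × Int × Int × String × String)) (e : String)
    (t : Int × Int × Int × String × String) (h : l.getLast? = some t) :
    pvLastStop l e = t.2.2.2.2 := by
  induction l generalizing e with
  | nil => simp at h
  | cons b u ih =>
    cases u with
    | nil => simp [List.getLast?] at h; simp [pvLastStop, h]
    | cons c u' => exact ih b.2.2.2.2 (by simpa using h)


-- bounds[0], bounds[2j] (1 ≤ j ≤ n), bounds[2j+1] (j < n), bounds[2n+1], as getElem facts
def pvBounds (l : List (Int × Int × Int × String × String)) : List String :=
  "12:00am" :: (pvFlat l ++ ["11:59pm"])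

@[simp] lemma pvBounds_length (l : List (Int × Int × Int × String × String)) :
    (pvBounds l).length = 2 * l.length + 2 := by simp [pvBounds]

lemma pvBounds_even (l : List (Int × Int × Int × String × String)) (j : Nat)
    (hj1 : 1 ≤ j) (hj : j ≤ l.length) :
    (pvBounds l)[2*j]'(by simp; omega) = (l[j-1]'(by omega)).2.2.2.2 := by
  have h2 : 2 * j = (2 * (j - 1) + 1) + 1 := by omega
  have hlt : 2 * (j - 1) + 1 < (pvFlat l).length := by simp; omega
  calc (pvBounds l)[2*j]'(by simp; omega)
      = (pvFlat l ++ ["11:59pm"])[2*(j-1)+1]'(by simp; omega) := by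
        simp only [pvBounds, h2, List.getElem_cons_succ]
    _ = (pvFlat l)[2*(j-1)+1]'hlt := List.getElem_append_left hlt
    _ = (l[j-1]'(by omega)).2.2.2.2 := pvFlat_getElem_odd l (j-1) (by omega)

lemma pvBounds_odd (l : List (Int × Int × Int × String × String)) (j : Nat)
    (hj : j < l.length) :
    (pvBounds l)[2*j+1]'(by simp; omega) = l[j].2.2.2.1 := by
  have hlt : 2 * j < (pvFlat l).length := by simp; omega
  calc (pvBounds l)[2*j+1]'(by simp; omega)
      = (pvFlat l ++ ["11:59pm"])[2*j]'(by simp; omega) := by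
        simp only [pvBounds, List.getElem_cons_succ]
    _ = (pvFlat l)[2*j]'hlt := List.getElem_append_left hlt
    _ = l[j].2.2.2.1 := pvFlat_getElem_even l j hj

lemma pvBounds_top (l : List (Int × Int × Int × String × String)) :
    (pvBounds l)[2*l.length+1]'(by simp) = "11:59pm" := by
  have h : (pvFlat l).length ≤ 2 * l.length := by simp
  calc (pvBounds l)[2*l.length+1]'(by simp)
      = (pvFlat l ++ ["11:59pm"])[2*l.length]'(by simp) := by
        simp only [pvBounds, List.getElem_cons_succ]
    _ = ["11:59pm"][2*l.length - (pvFlat l).length]'(by simp) := List.getElem_append_right h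
    _ = "11:59pm" := by simp

-- the body of B's index loop, fully evaluated at a Nat index
def pvEntry (l : List (Int × Int × Int × String × String)) (k : Nat) :
    Int × Int × Int × String × String :=
  let b := PySem.List.pyGetD l (if ((k : Int) == (l.length : Int)) = true then 0 else (k : Int)) (0, 0, 0, "", "")
  (b.1, b.2.1, b.2.2.1,
   PySem.List.pyGetD (pvBounds l) (2 * (k : Int)) "",
   PySem.List.pyGetD (pvBounds l) (2 * (k : Int) + 1) "")

-- Int-indexed form of the loop body (what the port's lambda reduces to)
def pvEntryI (l : List (Int × Int × Int × String × String)) (i : Int) :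
    Int × Int × Int × String × String :=
  let b := PySem.List.pyGetD l (if (i == (l.length : Int)) = true then 0 else i) (0, 0, 0, "", "")
  (b.1, b.2.1, b.2.2.1,
   PySem.List.pyGetD (pvBounds l) (2 * i) "",
   PySem.List.pyGetD (pvBounds l) (2 * i + 1) "")

lemma altB_eq (l : List (Int × Int × Int × String × String)) :
    getFreeTimesList_alt l = (List.range (l.length + 1)).map (pvEntry l) := by
  unfold getFreeTimesList_alt
  rw [pvFoldB l ["12:00am"]]
  show (PySem.List.pyRange 0 ((l.length : Int) + 1) 1).foldl
      (fun out i => out ++ [pvEntryI l i]) [] = _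
  rw [PySem.List.foldl_append_singleton_eq_map (pvEntryI l)]
  have hc : (l.length : Int) + 1 = ((l.length + 1 : Nat) : Int) := by push_cast; ring
  rw [hc, PySem.List.pyRange_zero_nat, List.map_map]
  rfl

-- ===== VERDICT (by name: the statement is the Claim_ definition above) =====
theorem getFreeTimesList_spec : Claim_equal_getFreeTimesList := by
  intro l _ hpre
  unfold Spec_getFreeTimesList
  rw [altB_eq]
  cases l with
  | nil => exact absurd rfl hpre
  | cons hd tl =>
  unfold getFreeTimesList
  rw [pvFoldA (hd :: tl) [] "12:00am"]
  simp only [PySem.List.pyGet?_zero_cons, List.nil_append]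
  apply List.ext_getElem
  · simp
  intro j h1 h2
  rw [List.getElem_map, List.getElem_range]
  have hn : (hd :: tl).length = tl.length + 1 := rfl
  by_cases hj : j < (hd :: tl).length
  · -- an ordinary free block
    have hjb : j < (pvBlocks (hd :: tl) "12:00am").length := by simpa using hj
    rw [List.getElem_append_left hjb, pvBlocks_getElem (hd :: tl) "12:00am" j hj]
    have hne : (((j : Int) == ((hd :: tl).length : Int)) = true) = False := by
      simp only [beq_iff_eq, Nat.cast_inj, eq_iff_iff, iff_false]
      omega
    have hj' : j < tl.length + 1 := by simpa using hj
    have hcast1 : (2 : Int) * (j : Nat) = ((2 * j : Nat) : Int) := by push_cast; ring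
    have hcast2 : (2 : Int) * (j : Nat) + 1 = ((2 * j + 1 : Nat) : Int) := by push_cast; ring
    simp only [pvEntry]
    rw [if_neg (of_eq_false hne), hcast2, hcast1,
        PySem.List.pyGetD_natCast, PySem.List.pyGetD_natCast, PySem.List.pyGetD_natCast,
        List.getD_eq_getElem _ _ hj,
        List.getD_eq_getElem _ _ (show 2*j+1 < (pvBounds (hd::tl)).length by rw [pvBounds_length]; omega),
        List.getD_eq_getElem _ _ (show 2*j < (pvBounds (hd::tl)).length by rw [pvBounds_length]; omega),
        pvBounds_odd (hd :: tl) j hj]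
    rcases Nat.eq_zero_or_pos j with h0 | h0
    · subst h0; simp [pvBounds]
    · rw [pvBounds_even (hd :: tl) j h0 (Nat.le_of_lt hj)]
      simp [Nat.pos_iff_ne_zero.mp h0]
  · -- the final free block
    have h2' : j ≤ tl.length + 1 := by simpa using h2
    have hjge : ¬ j < tl.length + 1 := by simpa using hj
    have hj' : j = (hd :: tl).length := by simp; omega
    subst hj'
    have hlb : (pvBlocks (hd :: tl) "12:00am").length ≤ (hd :: tl).length := by simp
    rw [List.getElem_append_right hlb]
    have heq : (((((hd :: tl).length : Nat) : Int) == (((hd :: tl).length : Nat) : Int)) = true) := by simp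
    have hcast1 : (2 : Int) * ((hd :: tl).length : Nat) = ((2 * (hd :: tl).length : Nat) : Int) := by push_cast; ring
    have hcast2 : (2 : Int) * ((hd :: tl).length : Nat) + 1 = ((2 * (hd :: tl).length + 1 : Nat) : Int) := by push_cast; ring
    have hidx : (hd :: tl).length - (pvBlocks (hd :: tl) "12:00am").length = 0 := by simp
    simp only [pvEntry]
    rw [if_pos heq, hcast2, hcast1,
        PySem.List.pyGetD_natCast, PySem.List.pyGetD_natCast,
        List.getD_eq_getElem _ _ (show 2*(hd::tl).length+1 < (pvBounds (hd::tl)).length by rw [pvBounds_length]; omega),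
        List.getD_eq_getElem _ _ (show 2*(hd::tl).length < (pvBounds (hd::tl)).length by rw [pvBounds_length]; omega),
        pvBounds_top, pvBounds_even (hd :: tl) (hd :: tl).length (by simp) (le_refl _),
        PySem.List.pyGetD_zero_cons]
    have hlast : pvLastStop (hd :: tl) "12:00am"
        = ((hd :: tl)[(hd :: tl).length - 1]'(by simp)).2.2.2.2 := by
      rw [pvLastStop_eq_getLast (hd :: tl) "12:00am" ((hd :: tl).getLast (by simp))
            (List.getLast?_eq_some_getLast (by simp)), List.getLast_eq_getElem]
      rfl
    simp [hlast]
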